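-- pv_equiv track=rewrite | github.com/mhcoen/mcloop | mcloop/wrap.py | _add_swift_init_call
-- ===== SOURCE A (Python) =====
-- def _add_swift_init_call(content: str) -> str:
--     """Add _mcloopSetupCrashHandlers() call to the app's init()."""
--     call = "_mcloopSetupCrashHandlers()"
--     if call in content:
--         return content
--
--     # Look for init() inside a struct/class after @main
--     lines = content.splitlines(keepends=True)
--     result = []
--     in_main_struct = False
--     found_init = False
--
--     for i, line in enumerate(lines):
--         result.append(line)
--         stripped = line.strip()
--
--         if "@main" in stripped:
--             in_main_struct = True
--             continue
--
--         if in_main_struct and not found_init: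
--             if "init()" in stripped and "{" in stripped:
--                 found_init = True
--                 # Find the opening brace and insert after it
--                 indent = len(line) - len(line.lstrip()) + 8
--                 result.append(" " * indent + call + "\n")
--                 continue
--
--     return "".join(result)
-- ===== SOURCE B (Python) =====
-- def _add_swift_init_call(content: str) -> str:
--     """Add _mcloopSetupCrashHandlers() call to the app's init()."""
--     call = "_mcloopSetupCrashHandlers()"
--     if call in content:
--         return content
--
--     lines = content.splitlines(keepends=True)
--     # locate the anchor: first line whose stripped form mentions @main
--     main_idx = next((i for i, ln in enumerate(lines) if "@main" in ln.strip()), None)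
--     if main_idx is None:
--         return content
--
--     # splice the call right after the first qualifying init() line below the anchor
--     for j in range(main_idx + 1, len(lines)):
--         s = lines[j].strip()
--         if "@main" in s:
--             continue  # an @main line is never the init anchor
--         if "init()" in s and "{" in s:
--             indent = len(lines[j]) - len(lines[j].lstrip()) + 8
--             lines.insert(j + 1, " " * indent + call + "\n")
--             break
--     return "".join(lines)
-- ===== Notes on version B (the rewrite author's own statement) =====
-- stated objective: alternative
-- what changed: Replaces A's single streaming pass with two booleans and an incrementally built result list by a locate-then-splice decomposition: find the index of the first @main line, scan only the lines after it for the first qualifying init() line, and list.insert the setup call right after it.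
import Mathlib
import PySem

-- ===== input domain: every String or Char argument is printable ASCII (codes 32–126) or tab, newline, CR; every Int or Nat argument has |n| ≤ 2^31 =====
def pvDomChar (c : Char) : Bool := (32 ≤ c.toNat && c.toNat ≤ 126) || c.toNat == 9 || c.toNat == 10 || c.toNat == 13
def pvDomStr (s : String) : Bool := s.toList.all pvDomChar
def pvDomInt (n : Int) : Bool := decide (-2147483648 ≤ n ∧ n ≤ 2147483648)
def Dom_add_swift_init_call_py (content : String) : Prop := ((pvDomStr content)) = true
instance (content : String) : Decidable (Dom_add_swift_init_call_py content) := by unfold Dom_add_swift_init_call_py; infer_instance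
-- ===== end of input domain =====

-- B replaces A's two-boolean streaming state machine by locate-first-@main-then-splice; alternative decomposition, same cost.

-- ===== PORT A =====
-- splitlines(keepends=True), ported by hand (PySem.Chars.splitlines drops the line endings);
-- exact on Dom (line breaks there are only \n, \r and \r\n).
def slk : List Char → List (List Char)
  | [] => []
  | c :: rest =>
    if c = '\n' then ['\n'] :: slk rest
    else if c = '\r' then
      if rest.head? = some '\n' then ['\r', '\n'] :: slk rest.tail
      else ['\r'] :: slk rest
    else
      match slk rest with
      | [] => [[c]]
      | l :: ls => (c :: l) :: ls
termination_by cs => cs.length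
decreasing_by all_goals simp [List.length_tail]

-- the inserted line: " " * (len(line) - len(line.lstrip()) + 8) + call + "\n"
def insLine (call : List Char) (line : List Char) : List Char :=
  List.replicate (line.length - (PySem.Chars.lstrip line).length + 8) ' ' ++ call ++ ['\n']

-- the body of A's for-loop: state = (result, in_main_struct, found_init)
def aStep (call : List Char) (st : List (List Char) × Bool × Bool) (line : List Char) :
    List (List Char) × Bool × Bool :=
  let result := st.1 ++ [line]
  let inMain := st.2.1
  let foundInit := st.2.2
  let stripped := PySem.Chars.strip line
  if PySem.Chars.isIn "@main".toList stripped then (result, true, foundInit)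
  else if inMain && !foundInit && PySem.Chars.isIn "init()".toList stripped
        && PySem.Chars.isIn "{".toList stripped then
    (result ++ [insLine call line], inMain, true)
  else (result, inMain, foundInit)

def add_swift_init_call_py (content : String) : String :=
  let call := "_mcloopSetupCrashHandlers()".toList
  if PySem.Chars.isIn call content.toList then content
  else
    let lines := slk content.toList
    let st := lines.foldl (aStep call) ([], false, false)
    String.ofList st.1.flatten

-- ===== PORT B =====
-- the for j in range(main_idx+1, len(lines)) loop with lines.insert(j+1, …) and break,
-- as a splice over the suffix after the anchor
def splice (call : List Char) : List (List Char) → List (List Char)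
  | [] => []
  | l :: ls =>
    let s := PySem.Chars.strip l
    if PySem.Chars.isIn "@main".toList s then l :: splice call ls
    else if PySem.Chars.isIn "init()".toList s && PySem.Chars.isIn "{".toList s then
      l :: insLine call l :: ls
    else l :: splice call ls

def add_swift_init_call_py_alt (content : String) : String :=
  let call := "_mcloopSetupCrashHandlers()".toList
  if PySem.Chars.isIn call content.toList then content
  else
    let lines := slk content.toList
    match lines.findIdx? (fun l => PySem.Chars.isIn "@main".toList (PySem.Chars.strip l)) with
    | none => content
    | some i => String.ofList (List.flatten (lines.take (i + 1) ++ splice call (lines.drop (i + 1))))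

-- ===== PRECONDITION & SPEC =====
def Spec_add_swift_init_call_py (content : String) (out : String) : Prop := out = add_swift_init_call_py_alt content
instance (content : String) (out : String) : Decidable (Spec_add_swift_init_call_py content out) := by unfold Spec_add_swift_init_call_py; infer_instance

-- ===== CLAIM (what is proved, stated in full; the proofs are below) =====
def Claim_equal_add_swift_init_call_py : Prop := ∀ (content : String), Dom_add_swift_init_call_py content → Spec_add_swift_init_call_py content (add_swift_init_call_py content)

-- ===== LEMMAS AND PROOFS =====

theorem flatten_slk (cs : List Char) : (slk cs).flatten = cs := by
  induction cs using slk.induct with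
  | case1 => simp [slk]
  | case2 rest ih => simp [slk, ih]
  | case3 rest h1 h2 ih =>
    cases rest with
    | nil => simp at h1
    | cons d rest' =>
      simp only [List.head?_cons, Option.some.injEq] at h1
      subst h1
      simp only [slk, reduceIte, List.head?_cons, List.tail_cons] at *
      simp [ih]
  | case4 rest h1 h2 ih =>
    simp only [slk, reduceIte, if_neg h1]
    simp [ih]
  | case5 c rest h1 h2 h3 ih =>
    rw [show slk (c :: rest) = (match slk rest with
        | [] => [[c]] | l :: ls => (c :: l) :: ls) from by
      simp only [slk]; rw [if_neg h1, if_neg h2]]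
    rw [h3] at ih ⊢
    simp_all
  | case6 c rest h1 h2 l ls h3 ih =>
    rw [show slk (c :: rest) = (match slk rest with
        | [] => [[c]] | l :: ls => (c :: l) :: ls) from by
      simp only [slk]; rw [if_neg h1, if_neg h2]]
    rw [h3] at ih ⊢
    simp_all

-- found_init = true: the loop only appends the remaining lines
theorem foldl_found (call : List Char) (lines res : List (List Char)) (b : Bool) :
    (lines.foldl (aStep call) (res, b, true)).1 = res ++ lines := by
  induction lines generalizing res b with
  | nil => simp
  | cons l ls ih =>
    simp only [List.foldl_cons, aStep]
    split
    · rw [ih]; simp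
    · simp only [Bool.not_true, Bool.and_false, Bool.false_and, Bool.false_eq_true, reduceIte]
      rw [ih]; simp

-- in_main_struct = true, found_init = false: the loop is the splice
theorem foldl_inmain (call : List Char) (lines res : List (List Char)) :
    (lines.foldl (aStep call) (res, true, false)).1 = res ++ splice call lines := by
  induction lines generalizing res with
  | nil => simp [splice]
  | cons l ls ih =>
    simp only [List.foldl_cons, aStep, splice]
    split
    · rw [ih]; simp
    · simp only [Bool.not_false, Bool.true_and, Bool.and_true]
      split
      · rw [foldl_found]; simp
      · rw [ih]; simp_all

-- start state: locate the first @main line, then splice after it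
theorem foldl_start (call : List Char) (lines res : List (List Char)) :
    (lines.foldl (aStep call) (res, false, false)).1 =
      match lines.findIdx? (fun l => PySem.Chars.isIn "@main".toList (PySem.Chars.strip l)) with
      | none => res ++ lines
      | some i => res ++ (lines.take (i + 1) ++ splice call (lines.drop (i + 1))) := by
  induction lines generalizing res with
  | nil => simp
  | cons l ls ih =>
    simp only [List.foldl_cons, aStep, List.findIdx?_cons]
    split
    · rw [foldl_inmain]
      simp
    · rename_i h
      simp only [Bool.false_and, Bool.false_eq_true, reduceIte]
      rw [ih]
      cases hf : ls.findIdx? (fun l => PySem.Chars.isIn "@main".toList (PySem.Chars.strip l)) with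
      | none => simp
      | some i => simp [List.take_succ_cons, List.drop_succ_cons]

-- ===== VERDICT (by name: the statement is the Claim_ definition above) =====
theorem add_swift_init_call_py_spec : Claim_equal_add_swift_init_call_py := by
  intro content _
  unfold Spec_add_swift_init_call_py add_swift_init_call_py add_swift_init_call_py_alt
  simp only
  split
  · rfl
  · rw [foldl_start]
    cases hf : (slk content.toList).findIdx?
        (fun l => PySem.Chars.isIn "@main".toList (PySem.Chars.strip l)) with
    | none =>
      simp only [List.nil_append, flatten_slk]
      exact String.ofList_toList
    | some i => simp
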